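-- pv_equiv track=rewrite | github.com/one61803/string-natural-arithmetic-engine | string natural arithmetic engine.py | number_versus_number
-- ===== SOURCE A (Python) =====
-- def pred(digit_CH):
--     "Predecessor function."
--     match digit_CH:
--         case "0":
--             return "0"
--         case "1":
--             return "0"
--         case "2":
--             return "1"
--         case "3":
--             return "2"
--         case "4":
--             return "3"
--         case "5":
--             return "4"
--         case "6":
--             return "5"
--         case "7":
--             return "6"
--         case "8":
--             return "7"
--         case "9":
--             return "8"
--         case _:
--             p = pred(digit_CH[-1])
--             if not (p == digit_CH[-1]):
--                 return digit_CH[0:-1] + p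
--             else:
--                 return simplify(pred(digit_CH[0:-1]) + "9")
--
-- def simplify(number_ST):
--     "Removes preceding zeroes."
--     if (number_ST == ""):
--         return "0"
--     elif (len(number_ST) == 1):
--         return number_ST
--     elif number_ST[0] == "0":
--         return simplify(number_ST[1:])
--     else:
--         return number_ST
--
-- def digit_versus_digit(digit1_CH, digit2_CH):
--     "Compares two digits."
--     if (digit1_CH == digit2_CH):
--         return "="
--     elif (digit1_CH == "0"):
--         return "<"
--     elif (digit2_CH == "0"):
--         return ">"
--     else:
--         return digit_versus_digit(pred(digit1_CH), pred(digit2_CH))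
--
-- def number_versus_number(number1_ST, number2_ST):
--     "Compares two natural numbers."
--     number1_ST = simplify(number1_ST)
--     number2_ST = simplify(number2_ST)
--     if (len(number1_ST) > len(number2_ST)):
--         return ">"
--     elif (len(number1_ST) < len(number2_ST)):
--         return "<"
--     elif (len(number1_ST) == 1) and (len(number2_ST) == 1):
--         return digit_versus_digit(number1_ST, number2_ST)
--     elif (number1_ST[0] == number2_ST[0]):
--         return number_versus_number(number1_ST[1:], number2_ST[1:])
--     else:
--         return digit_versus_digit(number1_ST[0], number2_ST[0])
-- ===== SOURCE B (Python) =====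
-- def _compare_stripped(a, b):
--     "Compares two zero-stripped numerals: by length, then lexicographically."
--     if len(a) != len(b):
--         return ">" if len(a) > len(b) else "<"
--     if a == b:
--         return "="
--     return ">" if a > b else "<"
--
-- def number_versus_number(number1_ST, number2_ST):
--     "Compares two natural numbers."
--     a = number1_ST.lstrip("0") or "0"
--     b = number2_ST.lstrip("0") or "0"
--     return _compare_stripped(a, b)
-- ===== Notes on version B (the rewrite author's own statement) =====
-- stated objective: faster
-- what changed: Replaces the recursive digit-by-digit machinery (simplify/pred/digit_versus_digit with character decrement chains) by a single lstrip('0') followed by a length comparison and one built-in lexicographic string comparison.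
-- outside the precondition, e.g. on number_versus_number('0', '!'): A returns '<', B returns '>'; on number_versus_number('a', 'b'): A raises RecursionError, B returns '<'
import Mathlib
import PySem

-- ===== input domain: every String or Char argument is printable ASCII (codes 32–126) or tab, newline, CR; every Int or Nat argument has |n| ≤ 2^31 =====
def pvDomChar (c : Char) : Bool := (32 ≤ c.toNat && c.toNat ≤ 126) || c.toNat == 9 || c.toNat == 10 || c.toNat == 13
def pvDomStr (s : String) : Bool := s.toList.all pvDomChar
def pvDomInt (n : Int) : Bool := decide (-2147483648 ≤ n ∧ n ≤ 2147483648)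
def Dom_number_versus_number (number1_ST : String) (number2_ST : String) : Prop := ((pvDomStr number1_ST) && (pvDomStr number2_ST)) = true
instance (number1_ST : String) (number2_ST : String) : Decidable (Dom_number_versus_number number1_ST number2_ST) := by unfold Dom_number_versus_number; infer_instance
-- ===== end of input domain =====

-- B replaces A's recursive simplify/pred/digit_versus_digit machinery by one leading-zero strip
-- plus a length-then-lexicographic comparison (objective: faster).

-- ===== PORT A =====

-- simplify(number_ST): removes preceding zeroes (on List Char).
def simplifyA : List Char → List Char
  | [] => ['0']
  | [c] => [c]
  | c :: rest => if c = '0' then simplifyA rest else c :: rest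

-- pred(digit_CH), fueled: `none` models the RecursionError Python hits on non-digit
-- characters (and the IndexError on ""); on digit strings the fuel is never exhausted.
def predF : Nat → List Char → Option (List Char)
  | 0, _ => none
  | fuel + 1, s =>
    if s = ['0'] then some ['0']
    else if s = ['1'] then some ['0']
    else if s = ['2'] then some ['1']
    else if s = ['3'] then some ['2']
    else if s = ['4'] then some ['3']
    else if s = ['5'] then some ['4']
    else if s = ['6'] then some ['5']
    else if s = ['7'] then some ['6']
    else if s = ['8'] then some ['7']
    else if s = ['9'] then some ['8']
    else
      match PySem.List.pyGet? s (-1) with      -- digit_CH[-1]; none = IndexError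
      | none => none
      | some last =>
        match predF fuel [last] with
        | none => none
        | some p =>
          if ¬ (p = [last]) then some (PySem.List.slice s none (some (-1)) ++ p)   -- digit_CH[0:-1] + p
          else
            match predF fuel (PySem.List.slice s none (some (-1))) with
            | none => none
            | some q => some (simplifyA (q ++ ['9']))

-- digit_versus_digit, fueled the same way; `none` = RecursionError (never inside Pre_).
def dvdF : Nat → List Char → List Char → Option String
  | 0, _, _ => none
  | fuel + 1, d1, d2 =>
    if d1 = d2 then some "="
    else if d1 = ['0'] then some "<"
    else if d2 = ['0'] then some ">"
    else
      match predF fuel d1, predF fuel d2 with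
      | some p1, some p2 => dvdF fuel p1 p2
      | _, _ => none

theorem simplifyA_length_le : ∀ l : List Char, l ≠ [] → (simplifyA l).length ≤ l.length := by
  intro l
  induction l with
  | nil => intro h; exact absurd rfl h
  | cons c rest ih =>
    intro _
    match rest, ih with
    | [], _ => simp [simplifyA]
    | r :: rs, ih =>
      by_cases hc : c = '0'
      · have := ih (by simp)
        simp only [simplifyA, if_pos hc, List.length_cons]
        have ha : (r :: rs).length = rs.length + 1 := rfl
        omega
      · simp [simplifyA, hc]

theorem simplifyA_ne_nil : ∀ l : List Char, simplifyA l ≠ [] := by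
  intro l
  induction l with
  | nil => simp [simplifyA]
  | cons c rest ih =>
    match rest, ih with
    | [], _ => simp [simplifyA]
    | r :: rs, ih =>
      by_cases hc : c = '0' <;> simp [simplifyA, hc, ih]

-- number_versus_number, mirroring A's if-chain; fuel 20 for the digit comparisons is
-- never exhausted on the digit pairs A's terminating runs reach.
def nvnA (l1 l2 : List Char) : String :=
  if (simplifyA l1).length > (simplifyA l2).length then ">"
  else if (simplifyA l1).length < (simplifyA l2).length then "<"
  else if (simplifyA l1).length = 1 ∧ (simplifyA l2).length = 1 then
    (dvdF 20 (simplifyA l1) (simplifyA l2)).getD ""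
  else if (simplifyA l1).head? = (simplifyA l2).head? then
    nvnA (simplifyA l1).tail (simplifyA l2).tail        -- number1_ST[1:], number2_ST[1:]
  else
    (dvdF 20 (simplifyA l1).head?.toList (simplifyA l2).head?.toList).getD ""   -- number1_ST[0] vs number2_ST[0]
termination_by l1.length
decreasing_by
  rename_i h1 h2 h3 _
  have hne := simplifyA_ne_nil l1
  have hlen1 : (simplifyA l1).length ≠ 1 := by
    intro h
    exact h3 ⟨h, by omega⟩
  have hl1 : l1 ≠ [] := by
    intro h
    apply hlen1
    rw [h]
    rfl
  have := simplifyA_length_le l1 hl1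
  have h0 : 0 < (simplifyA l1).length := List.length_pos_of_ne_nil hne
  have : 1 ≤ l1.length := by cases l1 with | nil => exact absurd rfl hl1 | cons a b => simp
  simp only [List.length_tail]
  omega

def number_versus_number (number1_ST : String) (number2_ST : String) : String :=
  nvnA number1_ST.toList number2_ST.toList

-- ===== PORT B =====

-- number_ST.lstrip("0") or "0"
def stripZeros (l : List Char) : List Char :=
  match l.dropWhile (· == '0') with
  | [] => ['0']
  | r => r

-- Python's lexicographic `a < b` on strings, as lists of chars.
def ltChars : List Char → List Char → Bool
  | [], [] => false
  | [], _ :: _ => true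
  | _ :: _, [] => false
  | c :: cs, d :: ds => if c < d then true else if d < c then false else ltChars cs ds

-- _compare_stripped(a, b)
def compareStripped (a b : List Char) : String :=
  if a.length ≠ b.length then (if a.length > b.length then ">" else "<")
  else if a = b then "="
  else if ltChars b a then ">" else "<"

def number_versus_number_alt (number1_ST : String) (number2_ST : String) : String :=
  compareStripped (stripZeros number1_ST.toList) (stripZeros number2_ST.toList)

-- ===== PRECONDITION & SPEC =====

def pvDigits : List Char := ['0', '1', '2', '3', '4', '5', '6', '7', '8', '9']

-- Pre_ excludes unequal non-digit strings whose zero-stripped lengths coincide: on those A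
-- either hits infinite recursion in pred (RecursionError) or returns a value produced by its
-- '0'-sentinel character cases that need not match lexicographic order.
def Pre_number_versus_number (number1_ST : String) (number2_ST : String) : Prop :=
  (number1_ST.toList.all (fun c => pvDigits.contains c) && number2_ST.toList.all (fun c => pvDigits.contains c)) = true
  ∨ max 1 (number1_ST.toList.dropWhile (· == '0')).length ≠ max 1 (number2_ST.toList.dropWhile (· == '0')).length
  ∨ number1_ST = number2_ST

instance (number1_ST : String) (number2_ST : String) : Decidable (Pre_number_versus_number number1_ST number2_ST) := by unfold Pre_number_versus_number; infer_instance

def pvWitness_number_versus_number : String × String := ("12", "7")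

def Spec_number_versus_number (number1_ST : String) (number2_ST : String) (out : String) : Prop := out = number_versus_number_alt number1_ST number2_ST
instance (number1_ST : String) (number2_ST : String) (out : String) : Decidable (Spec_number_versus_number number1_ST number2_ST out) := by unfold Spec_number_versus_number; infer_instance

-- ===== CLAIM (what is proved, stated in full; the proofs are below) =====
def Claim_equal_number_versus_number : Prop := ∀ (number1_ST : String) (number2_ST : String), Dom_number_versus_number number1_ST number2_ST → Pre_number_versus_number number1_ST number2_ST → Spec_number_versus_number number1_ST number2_ST (number_versus_number number1_ST number2_ST)

-- ===== LEMMAS AND PROOFS =====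

theorem simplifyA_eq_stripZeros : ∀ l : List Char, simplifyA l = stripZeros l := by
  intro l
  induction l with
  | nil => rfl
  | cons c rest ih =>
    by_cases hc : c = '0'
    · subst hc
      cases rest with
      | nil => rfl
      | cons r rs => simp [simplifyA, stripZeros, List.dropWhile_cons] at ih ⊢; exact ih
    · cases rest <;> simp [simplifyA, stripZeros, hc]

theorem stripZeros_ne_nil (l : List Char) : stripZeros l ≠ [] := by
  rw [← simplifyA_eq_stripZeros]; exact simplifyA_ne_nil l

theorem stripZeros_length_le (l : List Char) (h : l ≠ []) : (stripZeros l).length ≤ l.length := by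
  rw [← simplifyA_eq_stripZeros]; exact simplifyA_length_le l h

theorem stripZeros_cons_zero (r : List Char) : stripZeros ('0' :: r) = stripZeros r := by
  simp [stripZeros, List.dropWhile]

theorem stripZeros_cons_ne (c : Char) (r : List Char) (h : c ≠ '0') :
    stripZeros (c :: r) = c :: r := by
  simp [stripZeros, h]

theorem mem_stripZeros_digits {l : List Char} (h : ∀ c ∈ l, c ∈ pvDigits) :
    ∀ c ∈ stripZeros l, c ∈ pvDigits := by
  intro c hc
  unfold stripZeros at hc
  rcases hdw : l.dropWhile (· == '0') with _ | ⟨x, xs⟩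
  · rw [hdw] at hc
    simp at hc; subst hc; simp [pvDigits]
  · rw [hdw] at hc
    exact h c (List.dropWhile_sublist (p := (· == '0')) (l := l) |>.subset (hdw ▸ hc))

-- dvd on single digit characters computes the character comparison.
theorem dvdF_digit (c d : Char) (hc : c ∈ pvDigits) (hd : d ∈ pvDigits) :
    dvdF 20 [c] [d] = some (if c = d then "=" else if c < d then "<" else ">") := by
  fin_cases hc <;> fin_cases hd <;> decide

theorem ltChars_cons_self (c : Char) (a b : List Char) :
    ltChars (c :: a) (c :: b) = ltChars a b := by
  simp [ltChars]

theorem compareStripped_cons (c : Char) (a b : List Char) (h : a.length = b.length) :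
    compareStripped (c :: a) (c :: b) = compareStripped a b := by
  simp [compareStripped, h, ltChars_cons_self]

theorem digit_pos_of_ne_zero {d : Char} (hd : d ∈ pvDigits) (h : d ≠ '0') : '0' < d := by
  fin_cases hd <;> first | (exact absurd rfl h) | decide

-- Stripping leading zeros from equal-length digit strings does not change the comparison.
theorem compareStripped_strip (u v : List Char) (hlen : u.length = v.length)
    (hu : ∀ c ∈ u, c ∈ pvDigits) (hv : ∀ c ∈ v, c ∈ pvDigits) :
    compareStripped (stripZeros u) (stripZeros v) = compareStripped u v := by
  induction u generalizing v with
  | nil =>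
    cases v with
    | nil => decide
    | cons d v' => simp at hlen
  | cons c u' ih =>
    cases v with
    | nil => simp at hlen
    | cons d v' =>
      have hlen' : u'.length = v'.length := by simpa using hlen
      have hc : c ∈ pvDigits := hu c (by simp)
      have hd : d ∈ pvDigits := hv d (by simp)
      by_cases hc0 : c = '0' <;> by_cases hd0 : d = '0'
      · -- both leading zeros: strip both, reduce to tails
        subst hc0; subst hd0
        rw [stripZeros_cons_zero, stripZeros_cons_zero,
          ih v' hlen' (fun x hx => hu x (by simp [hx])) (fun x hx => hv x (by simp [hx])),
          compareStripped_cons _ _ _ hlen']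
      · -- u starts with '0', v does not: both sides give "<"
        subst hc0
        rw [stripZeros_cons_zero, stripZeros_cons_ne d v' hd0]
        have hdpos : '0' < d := digit_pos_of_ne_zero hd hd0
        have hrhs : compareStripped ('0' :: u') (d :: v') = "<" := by
          have hne : ('0' :: u') ≠ (d :: v') := by simp [Ne.symm hd0]
          have hlt : ltChars (d :: v') ('0' :: u') = false := by
            simp [ltChars, hdpos, not_lt_of_gt hdpos]
          simp [compareStripped, hlen, List.length_cons, hne, hlt]
        rw [hrhs]
        cases u' with
        | nil =>
          -- u = "0": strip gives ['0'], same one-char comparison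
          have hv1 : v' = [] := by cases v' <;> simp_all
          subst hv1
          have hne : (['0'] : List Char) ≠ [d] := by simp [Ne.symm hd0]
          have hlt : ltChars [d] ['0'] = false := by
            simp [ltChars, hdpos, not_lt_of_gt hdpos]
          simp [stripZeros, List.dropWhile, compareStripped, hne, hlt]
        | cons x xs =>
          -- stripped u is strictly shorter than v
          have h1 : (stripZeros (x :: xs)).length ≤ (x :: xs).length := stripZeros_length_le _ (by simp)
          have hlt2 : (stripZeros (x :: xs)).length < (d :: v').length := by
            have e1 : (x :: xs).length = v'.length := by simpa using hlen'
            have e2 : (d :: v').length = v'.length + 1 := rfl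
            omega
          unfold compareStripped
          rw [if_pos (Nat.ne_of_lt hlt2), if_neg (by omega)]
      · -- symmetric: v starts with '0', u does not: both sides give ">"
        subst hd0
        rw [stripZeros_cons_ne c u' hc0, stripZeros_cons_zero]
        have hcpos : '0' < c := digit_pos_of_ne_zero hc hc0
        have hrhs : compareStripped (c :: u') ('0' :: v') = ">" := by
          have hne : (c :: u') ≠ ('0' :: v') := by simp [hc0]
          have hlt : ltChars ('0' :: v') (c :: u') = true := by
            simp [ltChars, hcpos, not_lt_of_gt hcpos]
          simp [compareStripped, hlen, List.length_cons, hne, hlt]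
        rw [hrhs]
        cases v' with
        | nil =>
          have hu1 : u' = [] := by cases u' <;> simp_all
          subst hu1
          have hne : ([c] : List Char) ≠ ['0'] := by simp [hc0]
          have hlt : ltChars ['0'] [c] = true := by
            simp [ltChars, hcpos, not_lt_of_gt hcpos]
          simp [stripZeros, List.dropWhile, compareStripped, hne, hlt]
        | cons x xs =>
          have h1 : (stripZeros (x :: xs)).length ≤ (x :: xs).length := stripZeros_length_le _ (by simp)
          have hlt2 : (stripZeros (x :: xs)).length < (c :: u').length := by
            have e1 : u'.length = (x :: xs).length := hlen'
            have e2 : (c :: u').length = u'.length + 1 := rfl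
            have e3 : (x :: xs).length = xs.length + 1 := rfl
            omega
          unfold compareStripped
          rw [if_pos (by omega), if_pos (by omega)]
      · -- neither starts with '0': stripping is the identity
        rw [stripZeros_cons_ne c u' hc0, stripZeros_cons_ne d v' hd0]

theorem compareStripped_one (c d : Char) :
    compareStripped [c] [d] = (if c = d then "=" else if c < d then "<" else ">") := by
  by_cases h : c = d
  · simp [compareStripped, h]
  · rcases lt_trichotomy c d with hlt | heq | hgt
    · simp [compareStripped, h, ltChars, hlt, not_lt_of_gt hlt]
    · exact absurd heq h
    · simp [compareStripped, h, ltChars, hgt, not_lt_of_gt hgt]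

-- Main invariant on digit strings: A's recursion computes B's stripped comparison.
theorem nvnA_digits : ∀ n (l1 l2 : List Char), l1.length ≤ n →
    (∀ c ∈ l1, c ∈ pvDigits) → (∀ c ∈ l2, c ∈ pvDigits) →
    nvnA l1 l2 = compareStripped (stripZeros l1) (stripZeros l2) := by
  intro n
  induction n with
  | zero =>
    intro l1 l2 hn h1 h2
    have : l1 = [] := by cases l1 <;> simp_all
    subst this
    cases l2 with
    | nil =>
      rw [nvnA]
      simp only [simplifyA_eq_stripZeros]
      have h0 : stripZeros ([] : List Char) = ['0'] := by decide
      rw [h0]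
      simp [dvdF, compareStripped]
    | cons d v =>
      rw [nvnA]
      simp only [simplifyA_eq_stripZeros]
      have h0 : stripZeros ([] : List Char) = ['0'] := by decide
      rw [h0]
      have hne := stripZeros_ne_nil (d :: v)
      rcases hs : stripZeros (d :: v) with _ | ⟨e, w⟩
      · exact absurd hs hne
      have he : e ∈ pvDigits := mem_stripZeros_digits h2 e (by rw [hs]; simp)
      cases w with
      | cons x xs =>
        -- lengths 1 < 2+: both sides "<"
        simp [compareStripped, List.length_cons]
      | nil =>
        -- both length 1
        have hdig := dvdF_digit '0' e (by simp [pvDigits]) he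
        rw [if_neg (by simp), if_neg (by simp), if_pos (by simp), hdig,
          compareStripped_one]
        simp
  | succ n ih =>
    intro l1 l2 hn h1 h2
    rw [nvnA]
    simp only [simplifyA_eq_stripZeros]
    have hne1 := stripZeros_ne_nil l1
    have hne2 := stripZeros_ne_nil l2
    rcases hs1 : stripZeros l1 with _ | ⟨c1, t1⟩; · exact absurd hs1 hne1
    rcases hs2 : stripZeros l2 with _ | ⟨c2, t2⟩; · exact absurd hs2 hne2
    have hd1 : ∀ c ∈ c1 :: t1, c ∈ pvDigits := by rw [← hs1]; exact mem_stripZeros_digits h1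
    have hd2 : ∀ c ∈ c2 :: t2, c ∈ pvDigits := by rw [← hs2]; exact mem_stripZeros_digits h2
    by_cases hgt : (c1 :: t1).length > (c2 :: t2).length
    · rw [if_pos hgt]
      symm
      unfold compareStripped
      rw [if_pos (by omega), if_pos (by omega)]
    rw [if_neg hgt]
    by_cases hlt : (c1 :: t1).length < (c2 :: t2).length
    · rw [if_pos hlt]
      symm
      unfold compareStripped
      rw [if_pos (by omega), if_neg (by omega)]
    rw [if_neg hlt]
    have hlen : (c1 :: t1).length = (c2 :: t2).length := by omega
    by_cases h11 : (c1 :: t1).length = 1 ∧ (c2 :: t2).length = 1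
    · rw [if_pos h11]
      have ht1 : t1 = [] := by have := h11.1; simp at this; simp [this]
      have ht2 : t2 = [] := by have := h11.2; simp at this; simp [this]
      subst ht1; subst ht2
      rw [dvdF_digit c1 c2 (hd1 c1 (by simp)) (hd2 c2 (by simp)), compareStripped_one]
      simp
    rw [if_neg h11]
    have hlen2 : 2 ≤ (c1 :: t1).length := by
      have e : (c1 :: t1).length = t1.length + 1 := rfl
      have h1' : (c1 :: t1).length ≠ 1 := fun h => h11 ⟨h, hlen ▸ h⟩
      omega
    by_cases hhead : (c1 :: t1).head? = (c2 :: t2).head?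
    · rw [if_pos hhead]
      have hc12 : c1 = c2 := by simpa using hhead
      subst hc12
      have hl1ne : l1 ≠ [] := by
        intro h; subst h
        have h01 : stripZeros ([] : List Char) = ['0'] := by decide
        rw [h01] at hs1
        have e1 : (c1 :: t1).length = t1.length + 1 := rfl
        have e2 := congrArg List.length hs1
        simp only [List.length_cons, List.length_nil] at e2
        omega
      have hstep : t1.length ≤ n := by
        have hle := stripZeros_length_le l1 hl1ne
        rw [hs1] at hle
        have e : (c1 :: t1).length = t1.length + 1 := rfl
        omega
      have ihp := ih t1 t2 hstep (fun c hc => hd1 c (by simp [hc])) (fun c hc => hd2 c (by simp [hc]))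
      simp only [List.tail_cons]
      rw [ihp, compareStripped_strip t1 t2 (by simpa using hlen)
        (fun c hc => hd1 c (by simp [hc])) (fun c hc => hd2 c (by simp [hc])),
        compareStripped_cons c1 t1 t2 (by simpa using hlen)]
    · rw [if_neg hhead]
      have hc12 : c1 ≠ c2 := by simpa using hhead
      simp only [List.head?_cons, Option.toList_some]
      rw [dvdF_digit c1 c2 (hd1 c1 (by simp)) (hd2 c2 (by simp))]
      have hnel : (c1 :: t1) ≠ (c2 :: t2) := by simp [hc12]
      rcases lt_trichotomy c1 c2 with hlt' | heq | hgt'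
      · have : ltChars (c2 :: t2) (c1 :: t1) = false := by
          simp [ltChars, hlt', not_lt_of_gt hlt']
        simp [compareStripped, hlen, hnel, this, hc12, hlt']
      · exact absurd heq hc12
      · have : ltChars (c2 :: t2) (c1 :: t1) = true := by
          simp [ltChars, hgt']
        simp [compareStripped, hlen, hnel, this, hc12, not_lt_of_gt hgt']

-- A returns "=" on any pair of equal strings.
theorem nvnA_self : ∀ n (l : List Char), l.length ≤ n → nvnA l l = "=" := by
  intro n
  induction n with
  | zero =>
    intro l hn
    have : l = [] := by cases l <;> simp_all
    subst this
    rw [nvnA]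
    simp only [simplifyA_eq_stripZeros]
    have h0 : stripZeros ([] : List Char) = ['0'] := by decide
    rw [h0]
    simp [dvdF]
  | succ n ih =>
    intro l hn
    rw [nvnA]
    have hne := stripZeros_ne_nil l
    simp only [simplifyA_eq_stripZeros]
    rcases hs : stripZeros l with _ | ⟨c, t⟩; · exact absurd hs hne
    rw [if_neg (by omega), if_neg (by omega)]
    by_cases h1 : (c :: t).length = 1 ∧ (c :: t).length = 1
    · rw [if_pos h1]
      have ht : t = [] := by have := h1.1; simp at this; simp [this]
      subst ht
      have : dvdF 20 [c] [c] = some "=" := by simp [dvdF]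
      rw [this]; rfl
    · rw [if_neg h1, if_pos True.intro]
      have hl : l ≠ [] := by
        intro h; subst h
        have : stripZeros ([] : List Char) = ['0'] := by decide
        rw [this] at hs
        exact h1 (by rw [← hs]; exact ⟨rfl, rfl⟩)
      have hle := stripZeros_length_le l hl
      rw [hs] at hle
      have e : (c :: t).length = t.length + 1 := rfl
      simp only [List.tail_cons]
      exact ih t (by omega)

-- A compares by stripped length alone when the stripped lengths differ.
theorem nvnA_length_ne (l1 l2 : List Char)
    (h : (stripZeros l1).length ≠ (stripZeros l2).length) :
    nvnA l1 l2 = compareStripped (stripZeros l1) (stripZeros l2) := by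
  rw [nvnA]
  simp only [simplifyA_eq_stripZeros]
  rcases Nat.lt_or_ge (stripZeros l2).length (stripZeros l1).length with hgt | hge
  · rw [if_pos hgt]; simp [compareStripped, h, hgt]
  · have hlt : (stripZeros l1).length < (stripZeros l2).length := by omega
    rw [if_neg (by omega), if_pos hlt]
    simp [compareStripped, h]
    omega

-- ===== VERDICT (by name: the statement is the Claim_ definition above) =====
theorem number_versus_number_spec : Claim_equal_number_versus_number := by
  intro s1 s2 _ hpre
  unfold Spec_number_versus_number number_versus_number number_versus_number_alt
  rcases hpre with hdig | hlen | heq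
  · rw [Bool.and_eq_true] at hdig
    have h1 : ∀ c ∈ s1.toList, c ∈ pvDigits := by
      have := hdig.1
      simpa [List.all_eq_true] using this
    have h2 : ∀ c ∈ s2.toList, c ∈ pvDigits := by
      have := hdig.2
      simpa [List.all_eq_true] using this
    exact nvnA_digits s1.toList.length s1.toList s2.toList le_rfl h1 h2
  · have hlen' : (stripZeros s1.toList).length ≠ (stripZeros s2.toList).length := by
      unfold stripZeros
      rcases h1 : s1.toList.dropWhile (· == '0') with _ | ⟨x, xs⟩ <;>
        rcases h2 : s2.toList.dropWhile (· == '0') with _ | ⟨y, ys⟩ <;>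
        simp_all
    exact nvnA_length_ne s1.toList s2.toList hlen'
  · subst heq
    rw [nvnA_self s1.toList.length s1.toList le_rfl]
    simp [compareStripped]
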